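-- pv_equiv track=rewrite | github.com/haonanwu123/pythonoefenen | codeGrade/A2W7P2.py | director_counts
-- ===== SOURCE A (Python) =====
-- def director_counts(file_content):
--     """Returns a list of tuples containing each director's name, number of movies, and number of TV shows."""
--     director_dict = {}
--     for row in file_content[1:]:
--         if row[3]:  # Check if the director field is not empty
--             directors = row[3].split(",")
--             for director in directors:
--                 director = director.strip()
--                 if director not in director_dict:
--                     # [movies_count, tv_shows_count]
--                     director_dict[director] = [0, 0]
--                 if row[1] == "Movie":
--                     director_dict[director][0] += 1
--                 elif row[1] == "TV Show":
--                     director_dict[director][1] += 1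
--     return sorted(
--         [(name, counts[0], counts[1]) for name, counts in director_dict.items()]
--     )
-- ===== SOURCE B (Python) =====
-- def director_counts(file_content):
--     """Returns a list of tuples containing each director's name, number of movies, and number of TV shows."""
--     rows = [row for row in file_content[1:] if row[3]]
--
--     def names(row):
--         return [d.strip() for d in row[3].split(",")]
--
--     all_tokens = [n for row in rows for n in names(row)]
--     movie_tokens = [n for row in rows if row[1] == "Movie" for n in names(row)]
--     tv_tokens = [n for row in rows if row[1] == "TV Show" for n in names(row)]
--     return sorted(
--         (name, movie_tokens.count(name), tv_tokens.count(name))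
--         for name in set(all_tokens)
--     )
-- ===== Notes on version B (the rewrite author's own statement) =====
-- stated objective: alternative
-- what changed: Replaced A's single pass that builds one dict of mutable [movies, tv] pairs with three independent passes: the list of all stripped director tokens, the Movie tokens and the TV-Show tokens, merged by counting over the deduplicated name set and sorted.
import Mathlib
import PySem

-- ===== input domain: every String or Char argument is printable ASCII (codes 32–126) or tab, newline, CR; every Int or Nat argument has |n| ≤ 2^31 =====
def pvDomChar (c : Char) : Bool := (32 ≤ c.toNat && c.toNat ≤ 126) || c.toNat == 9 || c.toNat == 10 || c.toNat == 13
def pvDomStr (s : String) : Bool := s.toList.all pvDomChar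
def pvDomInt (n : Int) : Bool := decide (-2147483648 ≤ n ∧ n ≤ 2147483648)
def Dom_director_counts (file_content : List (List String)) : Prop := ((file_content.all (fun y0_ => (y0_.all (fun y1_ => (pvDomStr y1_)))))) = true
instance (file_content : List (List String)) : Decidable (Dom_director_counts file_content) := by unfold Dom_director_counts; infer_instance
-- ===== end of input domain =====

-- B replaces A's single dict-building pass by three independent passes (all name tokens, Movie tokens,
-- TV-Show tokens) merged over the deduplicated name set by counting (objective: alternative decomposition).

-- ===== PORT A =====
-- row[i] with default "" — exact wherever the Python actually reads the field (index in range)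
def pvField (row : List String) (i : Int) : String := PySem.List.pyGetD row i ""

-- s.split(",") — the separator is never empty, so split? is always `some`
def pvSplitComma (s : String) : List String := (PySem.Str.split? s ",").getD []

def pvBumpA (row : List String) (d : PySem.Dict String (Int × Int)) (tok : String) :
    PySem.Dict String (Int × Int) :=
  let dir := PySem.Str.strip tok
  let d1 := if d.contains dir then d else d.insert dir (0, 0)
  if pvField row 1 = "Movie" then d1.modify dir (0, 0) (fun c => (c.1 + 1, c.2))
  else if pvField row 1 = "TV Show" then d1.modify dir (0, 0) (fun c => (c.1, c.2 + 1))
  else d1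

def pvRowStepA (d : PySem.Dict String (Int × Int)) (row : List String) :
    PySem.Dict String (Int × Int) :=
  match PySem.List.pyGet? row 3 with
  | none => d  -- Python raises IndexError here; such inputs are outside Pre_
  | some f3 => if f3 ≠ "" then (pvSplitComma f3).foldl (pvBumpA row) d else d

-- dict keys are pairwise distinct, so Python's tuple-lexicographic sort coincides with sorting by the name
def director_counts (file_content : List (List String)) : List (String × Int × Int) :=
  PySem.List.sorted
    (((file_content.drop 1).foldl pvRowStepA PySem.Dict.empty).items.map
      (fun kv => (kv.1, kv.2.1, kv.2.2)))
    (fun t => t.1) false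

-- ===== PORT B =====
-- the stripped director tokens of one row
def pvNames (row : List String) : List String :=
  (pvSplitComma (pvField row 3)).map PySem.Str.strip

-- the data rows with a non-empty director field
def pvRows (file_content : List (List String)) : List (List String) :=
  (file_content.drop 1).filter (fun r => pvField r 3 ≠ "")

-- sorted over the set: the name component is distinct on it, so the order is well defined
def director_counts_alt (file_content : List (List String)) : List (String × Int × Int) :=
  PySem.List.sorted
    ((PySem.Set.ofList ((pvRows file_content).flatMap pvNames)).map
      (fun n => (n,
        (((((pvRows file_content).filter (fun r => pvField r 1 = "Movie")).flatMap pvNames).count n : Int),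
         ((((pvRows file_content).filter (fun r => pvField r 1 = "TV Show")).flatMap pvNames).count n : Int)))))
    (fun t => t.1) false

-- ===== PRECONDITION & SPEC =====
-- Pre_ excludes exactly the inputs where Python A raises IndexError: a data row with fewer than 4 fields.
def Pre_director_counts (file_content : List (List String)) : Prop :=
  ∀ row ∈ file_content.drop 1, 4 ≤ row.length
instance (file_content : List (List String)) : Decidable (Pre_director_counts file_content) := by
  unfold Pre_director_counts; infer_instance

def pvWitness_director_counts : List (List String) :=
  [["id", "type", "title", "director"], ["1", "Movie", "T", "A, B"], ["2", "TV Show", "U", "B"]]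

def Spec_director_counts (file_content : List (List String)) (out : List (String × Int × Int)) : Prop :=
  out = director_counts_alt file_content
instance (file_content : List (List String)) (out : List (String × Int × Int)) :
    Decidable (Spec_director_counts file_content out) := by
  unfold Spec_director_counts; infer_instance

-- ===== CLAIM (what is proved, stated in full; the proofs are below) =====
def Claim_equal_director_counts : Prop :=
  ∀ (file_content : List (List String)), Dom_director_counts file_content →
    Pre_director_counts file_content →
    Spec_director_counts file_content (director_counts file_content)

-- ===== LEMMAS AND PROOFS =====

-- the (movies, tv-shows) increment a row contributes to each of its directors
def pvInc (row : List String) : Int × Int :=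
  if pvField row 1 = "Movie" then (1, 0)
  else if pvField row 1 = "TV Show" then (0, 1)
  else (0, 0)

lemma pv_getD_d1 (d : PySem.Dict String (Int × Int)) (dir n : String) :
    ((if d.contains dir then d else d.insert dir (0, 0))).getD n (0, 0) = d.getD n (0, 0) := by
  split_ifs with h
  · rfl
  · rw [Bool.not_eq_true] at h
    rw [PySem.Dict.getD_insert]
    split_ifs with h2
    · subst h2; rw [PySem.Dict.getD_of_not_contains d _ h]
    · rfl

lemma pv_contains_d1 (d : PySem.Dict String (Int × Int)) (dir : String) :
    ((if d.contains dir then d else d.insert dir (0, 0))).contains dir = true := by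
  split_ifs with h
  · exact h
  · exact PySem.Dict.contains_insert_self d dir (0, 0)

lemma pv_keys_modify_of_contains (d : PySem.Dict String (Int × Int)) (k : String)
    (d0 : Int × Int) (f : Int × Int → Int × Int) (h : d.contains k = true) :
    (d.modify k d0 f).keys = d.keys := by
  rw [PySem.Dict.keys_modify, PySem.Dict.keys_insert_of_contains _ _ h]

lemma pv_getD_bump (row : List String) (d : PySem.Dict String (Int × Int)) (tok n : String) :
    (pvBumpA row d tok).getD n (0, 0) =
      if n = PySem.Str.strip tok then d.getD n (0, 0) + pvInc row else d.getD n (0, 0) := by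
  unfold pvBumpA pvInc
  split_ifs with h1 h2 hn hn hn <;>
    simp_all [PySem.Dict.getD_modify, pv_getD_d1, Prod.ext_iff]

lemma pv_keys_bump (row : List String) (d : PySem.Dict String (Int × Int)) (tok : String) :
    (pvBumpA row d tok).keys = PySem.Set.add d.keys (PySem.Str.strip tok) := by
  unfold pvBumpA
  have hd1 : ((if d.contains (PySem.Str.strip tok) then d
      else d.insert (PySem.Str.strip tok) (0, 0))).keys
      = PySem.Set.add d.keys (PySem.Str.strip tok) := by
    split_ifs with h
    · simp [PySem.Set.add, PySem.Set.contains, ← PySem.Dict.contains_eq_decide_mem_keys, h]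
    · rw [Bool.not_eq_true] at h
      rw [PySem.Dict.keys_insert_of_not_contains d _ h]
      simp [PySem.Set.add, PySem.Set.contains, ← PySem.Dict.contains_eq_decide_mem_keys, h]
  split_ifs with h1 h2 <;>
    simp [pv_keys_modify_of_contains _ _ _ _ (pv_contains_d1 d _), hd1]

lemma pv_getD_inner (row : List String) : ∀ (ts : List String) (d : PySem.Dict String (Int × Int))
    (n : String),
    ((ts.foldl (pvBumpA row) d).getD n (0, 0)) =
      d.getD n (0, 0) +
        (((ts.map PySem.Str.strip).count n : Int) * (pvInc row).1,
         ((ts.map PySem.Str.strip).count n : Int) * (pvInc row).2) := by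
  intro ts
  induction ts with
  | nil => intro d n; simp
  | cons t ts ih =>
    intro d n
    rw [List.foldl_cons, ih, pv_getD_bump]
    by_cases hn : n = PySem.Str.strip t
    · rw [if_pos hn, List.map_cons, List.count_cons, if_pos (by simpa using hn.symm)]
      rw [Prod.ext_iff]
      constructor <;> (simp only [Prod.fst_add, Prod.snd_add]; push_cast; ring)
    · rw [if_neg hn, List.map_cons, List.count_cons, if_neg (by simpa using fun e => hn e.symm)]
      simp

lemma pv_keys_inner (row : List String) : ∀ (ts : List String) (d : PySem.Dict String (Int × Int)),
    ((ts.foldl (pvBumpA row) d)).keys = PySem.Set.update d.keys (ts.map PySem.Str.strip) := by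
  intro ts
  induction ts with
  | nil => intro d; simp [PySem.Set.update]
  | cons t ts ih =>
    intro d
    rw [List.foldl_cons, ih, pv_keys_bump]
    simp [PySem.Set.update]

lemma pv_rowStep_eq (d : PySem.Dict String (Int × Int)) (row : List String) :
    pvRowStepA d row =
      if pvField row 3 ≠ "" then (pvSplitComma (pvField row 3)).foldl (pvBumpA row) d else d := by
  unfold pvRowStepA pvField
  cases h : PySem.List.pyGet? row 3 <;> simp [PySem.List.pyGetD, h]

lemma pv_set_update_append (s : PySem.Set String) (xs ys : List String) :
    PySem.Set.update s (xs ++ ys) = PySem.Set.update (PySem.Set.update s xs) ys := by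
  simp [PySem.Set.update, List.foldl_append]

lemma pv_keys_outer : ∀ (l : List (List String)) (d : PySem.Dict String (Int × Int)),
    ((l.foldl pvRowStepA d)).keys =
      PySem.Set.update d.keys ((l.filter (fun r => pvField r 3 ≠ "")).flatMap pvNames) := by
  intro l
  induction l with
  | nil => intro d; simp [PySem.Set.update]
  | cons r l ih =>
    intro d
    rw [List.foldl_cons, ih, pv_rowStep_eq]
    by_cases h : pvField r 3 ≠ ""
    · rw [if_pos h, pv_keys_inner, List.filter_cons_of_pos (by simpa using h),
        List.flatMap_cons, pv_set_update_append]
      rfl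
    · rw [if_neg h, List.filter_cons_of_neg (by simpa using h)]

lemma pv_getD_outer : ∀ (l : List (List String)) (d : PySem.Dict String (Int × Int)) (n : String),
    ((l.foldl pvRowStepA d).getD n (0, 0)) =
      d.getD n (0, 0) +
        (((((l.filter (fun r => pvField r 3 ≠ "")).filter
              (fun r => pvField r 1 = "Movie")).flatMap pvNames).count n : Int),
         ((((l.filter (fun r => pvField r 3 ≠ "")).filter
              (fun r => pvField r 1 = "TV Show")).flatMap pvNames).count n : Int)) := by
  intro l
  induction l with
  | nil => intro d n; simp
  | cons r l ih =>
    intro d n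
    rw [List.foldl_cons, ih, pv_rowStep_eq]
    by_cases h3 : pvField r 3 ≠ ""
    · rw [if_pos h3, List.filter_cons_of_pos (by simpa using h3), pv_getD_inner]
      unfold pvInc
      by_cases hm : pvField r 1 = "Movie"
      · have ht : ¬ pvField r 1 = "TV Show" := by simp [hm]
        rw [List.filter_cons_of_pos (by simpa using hm),
          List.filter_cons_of_neg (by simpa using ht), if_pos hm]
        rw [List.flatMap_cons, List.count_append, Prod.ext_iff]
        constructor <;>
          (simp only [Prod.fst_add, Prod.snd_add, pvNames]; push_cast; ring)
      · by_cases ht : pvField r 1 = "TV Show"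
        · rw [List.filter_cons_of_neg (by simpa using hm),
            List.filter_cons_of_pos (by simpa using ht), if_neg hm, if_pos ht]
          rw [List.flatMap_cons, List.count_append, Prod.ext_iff]
          constructor <;>
            (simp only [Prod.fst_add, Prod.snd_add, pvNames]; push_cast; ring)
        · rw [List.filter_cons_of_neg (by simpa using hm),
            List.filter_cons_of_neg (by simpa using ht), if_neg hm, if_neg ht]
          rw [Prod.ext_iff]
          constructor <;> (simp only [Prod.fst_add, Prod.snd_add]; ring)
    · rw [if_neg h3, List.filter_cons_of_neg (by simpa using h3)]

-- ===== VERDICT (by name: the statement is the Claim_ definition above) =====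
theorem director_counts_spec : Claim_equal_director_counts := by
  intro fc _ _
  unfold Spec_director_counts director_counts director_counts_alt pvRows
  congr 1
  have hkeys : ((fc.drop 1).foldl pvRowStepA PySem.Dict.empty).keys =
      PySem.Set.ofList (((fc.drop 1).filter (fun r => pvField r 3 ≠ "")).flatMap pvNames) := by
    rw [pv_keys_outer, PySem.Dict.keys_empty]
    rw [PySem.Set.ofList_eq_foldl]
    rfl
  have hnd : ((fc.drop 1).foldl pvRowStepA PySem.Dict.empty).keys.Nodup := by
    rw [hkeys]; exact PySem.Set.nodup_ofList _
  rw [PySem.Dict.items_eq_map_keys _ hnd (0, 0), hkeys, List.map_map]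
  apply List.map_congr_left
  intro n _
  simp [pv_getD_outer]
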